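-- pv_equiv track=rewrite | github.com/deborahharrus/wwpdb-ccp4-ccd-comparison | create_detailed_comparison.py | format_atom_differences
-- ===== SOURCE A (Python) =====
-- from typing import Dict, List, Optional, Tuple, Any
--
-- def get_atom_key(atom_dict, key_name):
--     """Helper to get atom key from dict with different possible key formats."""
--     for possible_key in [key_name, f'_{key_name}', key_name.split('.')[-1]]:
--         if possible_key in atom_dict:
--             return atom_dict[possible_key]
--     return '?'
--
-- def atom_to_tuple(atom: Dict[str, Any]) -> tuple:
--     """Convert atom dict to tuple for comparison."""
--     atom_id = get_atom_key(atom, '_chem_comp_atom.atom_id')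
--     type_symbol = get_atom_key(atom, '_chem_comp_atom.type_symbol')
--     charge = get_atom_key(atom, '_chem_comp_atom.charge')
--     return (atom_id, type_symbol, charge)
--
-- def format_atom_differences(atoms1: List[Dict[str, Any]], atoms2: List[Dict[str, Any]]) -> tuple:
--     """Format only the differing atoms between two sets.
--     Returns (set1_differences, set2_differences) as formatted strings.
--     """
--     # Convert to sets of tuples for comparison
--     set1_atoms = {atom_to_tuple(a) for a in atoms1}
--     set2_atoms = {atom_to_tuple(a) for a in atoms2}
--
--     # Find differences
--     only_in_set1 = set1_atoms - set2_atoms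
--     only_in_set2 = set2_atoms - set1_atoms
--
--     # Format Set1 differences
--     formatted1 = []
--     for atom_tuple in sorted(only_in_set1):
--         atom_id, type_symbol, charge = atom_tuple
--         formatted1.append(f"{atom_id}({type_symbol},{charge})")
--
--     # Format Set2 differences
--     formatted2 = []
--     for atom_tuple in sorted(only_in_set2):
--         atom_id, type_symbol, charge = atom_tuple
--         formatted2.append(f"{atom_id}({type_symbol},{charge})")
--
--     return ("; ".join(formatted1), "; ".join(formatted2))
-- ===== SOURCE B (Python) =====
-- def get_atom_key(atom_dict, key_name):
--     for possible_key in [key_name, f'_{key_name}', key_name.split('.')[-1]]: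
--         if possible_key in atom_dict:
--             return atom_dict[possible_key]
--     return '?'
--
-- def atom_to_tuple(atom):
--     return (get_atom_key(atom, '_chem_comp_atom.atom_id'),
--             get_atom_key(atom, '_chem_comp_atom.type_symbol'),
--             get_atom_key(atom, '_chem_comp_atom.charge'))
--
-- def format_atom_differences(atoms1, atoms2):
--     """Symmetric difference via a single merge-walk over the two sorted,
--     deduplicated tuple lists (no set subtraction, no per-side sort of the
--     difference)."""
--     l1 = sorted(set(map(atom_to_tuple, atoms1)))
--     l2 = sorted(set(map(atom_to_tuple, atoms2)))
--     f1, f2 = [], []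
--     i = j = 0
--     while i < len(l1) and j < len(l2):
--         if l1[i] < l2[j]:
--             a, t, c = l1[i]
--             f1.append(f"{a}({t},{c})")
--             i += 1
--         elif l2[j] < l1[i]:
--             a, t, c = l2[j]
--             f2.append(f"{a}({t},{c})")
--             j += 1
--         else:
--             i += 1
--             j += 1
--     for a, t, c in l1[i:]:
--         f1.append(f"{a}({t},{c})")
--     for a, t, c in l2[j:]:
--         f2.append(f"{a}({t},{c})")
--     return ("; ".join(f1), "; ".join(f2))
-- ===== Notes on version B (the rewrite author's own statement) =====
-- stated objective: alternative
-- what changed: Replaces the two hash-set subtractions followed by two separate sorts of the differences with one sort of each deduplicated tuple list and a single two-pointer merge walk that emits left-only and right-only tuples in one pass.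
import Mathlib
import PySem

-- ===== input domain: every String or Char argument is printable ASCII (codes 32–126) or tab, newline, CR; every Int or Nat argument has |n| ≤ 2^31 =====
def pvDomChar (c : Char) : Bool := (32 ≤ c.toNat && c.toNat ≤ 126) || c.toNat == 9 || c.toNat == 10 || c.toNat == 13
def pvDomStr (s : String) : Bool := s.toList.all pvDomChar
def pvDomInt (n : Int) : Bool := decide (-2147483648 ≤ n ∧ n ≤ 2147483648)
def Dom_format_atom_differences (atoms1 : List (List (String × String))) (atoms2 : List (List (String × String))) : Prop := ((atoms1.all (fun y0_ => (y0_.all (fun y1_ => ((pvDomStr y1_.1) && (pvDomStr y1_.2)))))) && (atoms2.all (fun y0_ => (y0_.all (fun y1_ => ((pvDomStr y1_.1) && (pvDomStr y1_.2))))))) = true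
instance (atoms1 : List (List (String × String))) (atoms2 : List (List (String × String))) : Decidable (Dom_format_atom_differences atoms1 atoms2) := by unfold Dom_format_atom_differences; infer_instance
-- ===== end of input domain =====

-- B rewrites A's "set difference twice, then sort each difference" as "sort each
-- deduplicated tuple list once, then one two-pointer merge walk" (objective: alternative).

-- ===== PORT A =====
-- shared module helpers (both Pythons use the same get_atom_key / atom_to_tuple / f-string)

-- get_atom_key: first of the candidate keys present in the dict (first-match assoc lookup), else '?'
def getAtomKeyLoop (d : List (String × String)) : List String → String
  | [] => "?"
  | k :: ks =>
    match (PySem.Dict.mk d).get? k with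
    | some v => v
    | none => getAtomKeyLoop d ks

def getAtomKey (d : List (String × String)) (keyName : String) : String :=
  -- key_name.split('.')[-1]: split('.') is never empty, so [-1] is the last element ('?' branch unreachable)
  -- split? is none only for sep = "" (never here); split('.') is never empty, so [-1] is some
  getAtomKeyLoop d [keyName, "_" ++ keyName,
    (PySem.List.pyGet? ((PySem.Str.split? keyName ".").getD []) (-1)).getD "?"]

def atomToTuple (d : List (String × String)) : String × String × String :=
  (getAtomKey d "_chem_comp_atom.atom_id",
   getAtomKey d "_chem_comp_atom.type_symbol",
   getAtomKey d "_chem_comp_atom.charge")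

-- Python's lexicographic order on the (atom_id, type_symbol, charge) tuples
def tupKey (t : String × String × String) : Lex (String × Lex (String × String)) :=
  toLex (t.1, toLex (t.2.1, t.2.2))

-- f"{atom_id}({type_symbol},{charge})"
def fmtAtom (t : String × String × String) : String :=
  t.1 ++ "(" ++ t.2.1 ++ "," ++ t.2.2 ++ ")"

def format_atom_differences (atoms1 : List (List (String × String))) (atoms2 : List (List (String × String))) : String × String :=
  let set1Atoms := PySem.Set.ofList (atoms1.map atomToTuple)
  let set2Atoms := PySem.Set.ofList (atoms2.map atomToTuple)
  let onlyInSet1 := PySem.Set.diff set1Atoms set2Atoms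
  let onlyInSet2 := PySem.Set.diff set2Atoms set1Atoms
  let formatted1 := (PySem.List.sorted onlyInSet1 tupKey false).map fmtAtom
  let formatted2 := (PySem.List.sorted onlyInSet2 tupKey false).map fmtAtom
  (PySem.Str.join "; " formatted1, PySem.Str.join "; " formatted2)

-- ===== PORT B =====
-- the while-loop of Source B, viewed through the remaining suffixes l1[i:], l2[j:]
def mergeWalk : List (String × String × String) → List (String × String × String) → List String × List String
  | [], r => ([], r.map fmtAtom)
  | x :: xs, [] => ((x :: xs).map fmtAtom, [])
  | x :: xs, y :: ys =>
    if tupKey x < tupKey y then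
      (fmtAtom x :: (mergeWalk xs (y :: ys)).1, (mergeWalk xs (y :: ys)).2)
    else if tupKey y < tupKey x then
      ((mergeWalk (x :: xs) ys).1, fmtAtom y :: (mergeWalk (x :: xs) ys).2)
    else
      mergeWalk xs ys
termination_by l r => l.length + r.length

def format_atom_differences_alt (atoms1 : List (List (String × String))) (atoms2 : List (List (String × String))) : String × String :=
  let l1 := PySem.List.sorted (PySem.Set.ofList (atoms1.map atomToTuple)) tupKey false
  let l2 := PySem.List.sorted (PySem.Set.ofList (atoms2.map atomToTuple)) tupKey false
  let m := mergeWalk l1 l2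
  (PySem.Str.join "; " m.1, PySem.Str.join "; " m.2)

-- ===== PRECONDITION & SPEC =====
def Spec_format_atom_differences (atoms1 : List (List (String × String))) (atoms2 : List (List (String × String))) (out : String × String) : Prop := out = format_atom_differences_alt atoms1 atoms2
instance (atoms1 : List (List (String × String))) (atoms2 : List (List (String × String))) (out : String × String) : Decidable (Spec_format_atom_differences atoms1 atoms2 out) := by unfold Spec_format_atom_differences; infer_instance

-- ===== CLAIM (what is proved, stated in full; the proofs are below) =====
def Claim_equal_format_atom_differences : Prop := ∀ (atoms1 : List (List (String × String))) (atoms2 : List (List (String × String))), Dom_format_atom_differences atoms1 atoms2 → Spec_format_atom_differences atoms1 atoms2 (format_atom_differences atoms1 atoms2)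

-- ===== LEMMAS AND PROOFS =====

theorem tupKey_inj : Function.Injective tupKey := by
  intro a b h
  simp only [tupKey, toLex_inj, Prod.mk.injEq] at h
  exact Prod.ext h.1 (Prod.ext h.2.1 h.2.2)

-- sorted(set(xs)) is strictly increasing in the tuple order
theorem pairwise_lt_sorted_ofList (xs : List (String × String × String)) :
    (PySem.List.sorted (PySem.Set.ofList xs) tupKey false).Pairwise
      (fun a b => tupKey a < tupKey b) := by
  have hle := PySem.List.sorted_pairwise (PySem.Set.ofList xs) tupKey
  have hnd : (PySem.List.sorted (PySem.Set.ofList xs) tupKey false).Nodup :=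
    (PySem.List.sorted_perm (PySem.Set.ofList xs) tupKey false).nodup_iff.mpr
      (PySem.Set.nodup_ofList xs)
  exact (hle.and hnd).imp (fun {a b} h =>
    lt_of_le_of_ne h.1 (fun hk => h.2 (tupKey_inj hk)))

-- the merge walk on strictly increasing lists = the two one-sided filters
theorem mergeWalk_spec (l r : List (String × String × String))
    (hl : l.Pairwise (fun a b => tupKey a < tupKey b))
    (hr : r.Pairwise (fun a b => tupKey a < tupKey b)) :
    mergeWalk l r =
      ((l.filter (fun a => !decide (a ∈ r))).map fmtAtom,
       (r.filter (fun b => !decide (b ∈ l))).map fmtAtom) := by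
  fun_induction mergeWalk l r with
  | case1 r => simp
  | case2 x xs => simp
  | case3 x xs y ys hxy ih =>
    have hyall : ∀ b ∈ y :: ys, tupKey x < tupKey b := by
      intro b hb
      rcases List.mem_cons.mp hb with h | h
      · exact h ▸ hxy
      · exact lt_trans hxy (List.rel_of_pairwise_cons hr h)
    have hxnot : x ∉ y :: ys := fun hmem => lt_irrefl _ (hyall x hmem)
    have hfilt : (y :: ys).filter (fun b => !decide (b ∈ x :: xs))
        = (y :: ys).filter (fun b => !decide (b ∈ xs)) := by
      apply List.filter_congr
      intro b hb
      have : b ≠ x := fun h => lt_irrefl _ (h ▸ hyall b hb)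
      simp [List.mem_cons, this]
    have h1 : (x :: xs).filter (fun a => !decide (a ∈ y :: ys))
        = x :: xs.filter (fun a => !decide (a ∈ y :: ys)) :=
      List.filter_cons_of_pos (by simp [hxnot])
    rw [ih (List.Pairwise.of_cons hl) hr, h1, hfilt, List.map_cons]
  | case4 x xs y ys hxy hyx ih =>
    have hxall : ∀ a ∈ x :: xs, tupKey y < tupKey a := by
      intro a ha
      rcases List.mem_cons.mp ha with h | h
      · exact h ▸ hyx
      · exact lt_trans hyx (List.rel_of_pairwise_cons hl h)
    have hynot : y ∉ x :: xs := fun hmem => lt_irrefl _ (hxall y hmem)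
    have hfilt : (x :: xs).filter (fun a => !decide (a ∈ y :: ys))
        = (x :: xs).filter (fun a => !decide (a ∈ ys)) := by
      apply List.filter_congr
      intro a ha
      have : a ≠ y := fun h => lt_irrefl _ (h ▸ hxall a ha)
      simp [List.mem_cons, this]
    have h2 : (y :: ys).filter (fun b => !decide (b ∈ x :: xs))
        = y :: ys.filter (fun b => !decide (b ∈ x :: xs)) :=
      List.filter_cons_of_pos (by simp [hynot])
    rw [ih hl (List.Pairwise.of_cons hr), hfilt, h2, List.map_cons]
  | case5 x xs y ys hxy hyx ih =>
    have hkeq : tupKey x = tupKey y := le_antisymm (not_lt.mp hyx) (not_lt.mp hxy)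
    have hweq : x = y := tupKey_inj hkeq
    subst hweq
    have hxxs : x ∉ xs := fun h => lt_irrefl _ (List.rel_of_pairwise_cons hl h)
    have hxys : x ∉ ys := fun h => lt_irrefl _ (List.rel_of_pairwise_cons hr h)
    have hf1 : xs.filter (fun a => !decide (a ∈ x :: ys))
        = xs.filter (fun a => !decide (a ∈ ys)) := by
      apply List.filter_congr
      intro a ha
      have : a ≠ x := fun h => lt_irrefl _ (h ▸ List.rel_of_pairwise_cons hl ha)
      simp [List.mem_cons, this]
    have hf2 : ys.filter (fun b => !decide (b ∈ x :: xs))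
        = ys.filter (fun b => !decide (b ∈ xs)) := by
      apply List.filter_congr
      intro b hb
      have : b ≠ x := fun h => lt_irrefl _ (h ▸ List.rel_of_pairwise_cons hr hb)
      simp [List.mem_cons, this]
    have g1 : (x :: xs).filter (fun a => !decide (a ∈ x :: ys))
        = xs.filter (fun a => !decide (a ∈ x :: ys)) :=
      List.filter_cons_of_neg (by simp)
    have g2 : (x :: ys).filter (fun b => !decide (b ∈ x :: xs))
        = ys.filter (fun b => !decide (b ∈ x :: xs)) :=
      List.filter_cons_of_neg (by simp)
    rw [ih (List.Pairwise.of_cons hl) (List.Pairwise.of_cons hr), g1, g2, hf1, hf2]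

-- sorted(set(xs) - set(ys)) = filter of sorted(set(xs))
theorem sorted_diff_eq_filter (xs ys : List (String × String × String)) :
    PySem.List.sorted (PySem.Set.diff (PySem.Set.ofList xs) (PySem.Set.ofList ys)) tupKey false
      = (PySem.List.sorted (PySem.Set.ofList xs) tupKey false).filter
          (fun a => !decide (a ∈ PySem.Set.ofList ys)) := by
  have hnodF : ((PySem.List.sorted (PySem.Set.ofList xs) tupKey false).filter
      (fun a => !decide (a ∈ PySem.Set.ofList ys))).Nodup :=
    (((PySem.List.sorted_perm (PySem.Set.ofList xs) tupKey false).nodup_iff).mpr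
      (PySem.Set.nodup_ofList xs)).filter _
  apply PySem.List.sorted_eq_of_perm_of_pairwise_lt
  · apply (List.perm_ext_iff_of_nodup hnodF (PySem.Set.nodup_diff _ _ (PySem.Set.nodup_ofList xs))).mpr
    intro a
    simp [PySem.Set.mem_diff, PySem.List.mem_sorted]
  · exact List.Pairwise.filter _ (pairwise_lt_sorted_ofList xs)

-- ===== VERDICT (by name: the statement is the Claim_ definition above) =====
theorem format_atom_differences_spec : Claim_equal_format_atom_differences := by
  intro atoms1 atoms2 _
  unfold Spec_format_atom_differences format_atom_differences format_atom_differences_alt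
  dsimp only
  rw [mergeWalk_spec _ _ (pairwise_lt_sorted_ofList _) (pairwise_lt_sorted_ofList _)]
  rw [sorted_diff_eq_filter, sorted_diff_eq_filter]
  have h12 : (PySem.List.sorted (PySem.Set.ofList (atoms1.map atomToTuple)) tupKey false).filter
      (fun a => !decide (a ∈ PySem.Set.ofList (atoms2.map atomToTuple)))
      = (PySem.List.sorted (PySem.Set.ofList (atoms1.map atomToTuple)) tupKey false).filter
      (fun a => !decide (a ∈ PySem.List.sorted (PySem.Set.ofList (atoms2.map atomToTuple)) tupKey false)) := by
    apply List.filter_congr; intro a _; simp [PySem.List.mem_sorted]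
  have h21 : (PySem.List.sorted (PySem.Set.ofList (atoms2.map atomToTuple)) tupKey false).filter
      (fun a => !decide (a ∈ PySem.Set.ofList (atoms1.map atomToTuple)))
      = (PySem.List.sorted (PySem.Set.ofList (atoms2.map atomToTuple)) tupKey false).filter
      (fun a => !decide (a ∈ PySem.List.sorted (PySem.Set.ofList (atoms1.map atomToTuple)) tupKey false)) := by
    apply List.filter_congr; intro a _; simp [PySem.List.mem_sorted]
  rw [h12, h21]
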